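-- pv_equiv track=rewrite | github.com/EnesSakalliUniWien/BranchArchitect | brancharchitect/split_analysis.py | filter_minimal_splits
-- ===== SOURCE A (Python) =====
-- from typing import List, Dict, Tuple, Set
--
-- def filter_minimal_splits(splits: List[Set[int]]) -> List[Set[int]]:
--     """
--     Filters the list of splits to only include minimal unique splits,
--     i.e., splits that are not subsets of any other split in the list.
--
--     Args:
--     - splits (List[Set[int]]): List of splits represented as sets of taxon indices.
--
--     Returns:
--     - List[Set[int]]: Filtered list of minimal unique splits.
--     """
--     filtered_splits = []
--     for split in splits:
--         if not any(
--             split < other_split for other_split in splits if split != other_split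
--         ):
--             filtered_splits.append(split)
--     return filtered_splits
-- ===== SOURCE B (Python) =====
-- def filter_minimal_splits(splits):
--     """Keep only splits that are not proper subsets of any other split.
--
--     Sorted-by-size maximal-set construction: visit splits largest first,
--     keep one only if it is not a proper subset of a set kept so far,
--     then emit the kept splits in the original input order.
--     """
--     order = sorted(range(len(splits)), key=lambda i: -len(splits[i]))
--     kept_idx = []
--     kept_sets = []
--     for i in order:
--         s = splits[i]
--         if not any(s < t for t in kept_sets):
--             kept_idx.append(i)
--             kept_sets.append(s)
--     keep = set(kept_idx)
--     return [splits[i] for i in range(len(splits)) if i in keep]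
-- ===== Notes on version B (the rewrite author's own statement) =====
-- stated objective: alternative
-- what changed: Replaces A's all-pairs proper-subset scan (each split tested against the whole list) by a size-descending sorted pass that accumulates only kept maximal sets, testing each split against that accumulator, then reorders the kept splits back into input order.
import Mathlib
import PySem

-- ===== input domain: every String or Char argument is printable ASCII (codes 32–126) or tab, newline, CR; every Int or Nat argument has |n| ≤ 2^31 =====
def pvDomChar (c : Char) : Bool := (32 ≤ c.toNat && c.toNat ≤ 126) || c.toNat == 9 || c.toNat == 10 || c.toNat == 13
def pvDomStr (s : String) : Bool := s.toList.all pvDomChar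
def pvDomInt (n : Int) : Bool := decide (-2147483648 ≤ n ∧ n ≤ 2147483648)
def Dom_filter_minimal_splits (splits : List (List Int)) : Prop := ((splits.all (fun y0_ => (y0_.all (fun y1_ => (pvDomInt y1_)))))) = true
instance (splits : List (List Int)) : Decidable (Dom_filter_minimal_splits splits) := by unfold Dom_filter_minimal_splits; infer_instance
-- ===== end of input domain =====

-- B replaces A's all-pairs proper-subset scan by a size-descending pass that accumulates
-- maximal sets and reorders the kept splits back to input order (alternative decomposition).

-- ===== PORT A =====
def filter_minimal_splits (splits : List (List Int)) : List (List Int) :=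
  splits.foldl (fun filtered_splits split =>
    if !(splits.any (fun other_split =>
          !(PySem.Set.equal split other_split) &&
            (PySem.Set.issubset split other_split && !(PySem.Set.equal split other_split))))
    then filtered_splits ++ [split] else filtered_splits) []

-- ===== PORT B =====
-- s < t on Python sets: subset and not equal
def pvProperSub (s t : List Int) : Bool :=
  PySem.Set.issubset s t && !(PySem.Set.equal s t)

def filter_minimal_splits_alt (splits : List (List Int)) : List (List Int) :=
  let order := PySem.List.sorted (List.range splits.length)
      (fun i => -((splits.getD i []).length : Int)) false
  let kept := order.foldl (fun (st : List Nat × List (List Int)) i =>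
      let s := splits.getD i []
      if st.2.any (fun t => pvProperSub s t) then st
      else (st.1 ++ [i], st.2 ++ [s])) ([], [])
  (List.range splits.length).foldl (fun acc i =>
      if kept.1.contains i then acc ++ [splits.getD i []] else acc) []

-- ===== PRECONDITION & SPEC =====
-- Pre_ requires each inner list to be a duplicate-free representation of its Python set
-- (the type convention for set[int]); a list with a repeated element encodes no Python input.
def Pre_filter_minimal_splits (splits : List (List Int)) : Prop :=
  ∀ s ∈ splits, s.Nodup
instance (splits : List (List Int)) : Decidable (Pre_filter_minimal_splits splits) := by
  unfold Pre_filter_minimal_splits; infer_instance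

def pvWitness_filter_minimal_splits : List (List Int) := [[1, 2], [1], [3]]

def Spec_filter_minimal_splits (splits : List (List Int)) (out : List (List Int)) : Prop := out = filter_minimal_splits_alt splits
instance (splits : List (List Int)) (out : List (List Int)) : Decidable (Spec_filter_minimal_splits splits out) := by unfold Spec_filter_minimal_splits; infer_instance

-- ===== CLAIM (what is proved, stated in full; the proofs are below) =====
def Claim_equal_filter_minimal_splits : Prop := ∀ (splits : List (List Int)), Dom_filter_minimal_splits splits → Pre_filter_minimal_splits splits → Spec_filter_minimal_splits splits (filter_minimal_splits splits)

-- ===== LEMMAS AND PROOFS =====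

-- proper subset, as a proposition on the underlying sets
def PLt (s t : List Int) : Prop := (∀ x ∈ s, x ∈ t) ∧ ∃ x ∈ t, x ∉ s

lemma pvProperSub_iff (s t : List Int) : pvProperSub s t = true ↔ PLt s t := by
  simp only [pvProperSub, PySem.Set.equal, PySem.Set.issubset, PySem.Set.contains, PLt,
    Bool.and_eq_true, Bool.not_eq_true', Bool.and_eq_false_iff, List.all_eq_true,
    List.contains_iff_mem, List.all_eq_false]
  constructor
  · rintro ⟨hsub, h⟩
    refine ⟨hsub, ?_⟩
    rcases h with h | h
    · obtain ⟨x, hx, hnx⟩ := h; exact absurd (hsub x hx) (by simpa using hnx)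
    · obtain ⟨x, hx, hnx⟩ := h; exact ⟨x, hx, by simpa using hnx⟩
  · rintro ⟨hsub, x, hx, hnx⟩
    exact ⟨hsub, Or.inr ⟨x, hx, by simpa using hnx⟩⟩

-- A's per-element test equals B's pvProperSub
lemma predA_eq (s t : List Int) :
    (!(PySem.Set.equal s t) && (PySem.Set.issubset s t && !(PySem.Set.equal s t)))
      = pvProperSub s t := by
  unfold pvProperSub
  cases PySem.Set.equal s t <;> cases PySem.Set.issubset s t <;> rfl

-- "is properly contained in some element of splits", as the Bool both programs branch on
def domP (splits : List (List Int)) (s : List Int) : Prop := ∃ t ∈ splits, PLt s t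

lemma exists_len_max (l : List (List Int)) (h : l ≠ []) :
    ∃ a ∈ l, ∀ b ∈ l, b.length ≤ a.length := by
  induction l with
  | nil => exact absurd rfl h
  | cons x xs ih =>
    rcases eq_or_ne xs [] with rfl | hne
    · exact ⟨x, by simp, by simp⟩
    · obtain ⟨a, ha, hmax⟩ := ih hne
      by_cases hx : x.length ≤ a.length
      · refine ⟨a, by simp [ha], ?_⟩
        intro b hb
        rcases List.mem_cons.mp hb with rfl | hb'
        · exact hx
        · exact hmax b hb'
      · refine ⟨x, by simp, ?_⟩
        intro b hb
        rcases List.mem_cons.mp hb with rfl | hb'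
        · exact le_refl _
        · exact le_trans (hmax b hb') (by omega)

lemma plt_trans {s t u : List Int} (h1 : PLt s t) (h2 : PLt t u) : PLt s u := by
  obtain ⟨hs, x, hx, hxs⟩ := h1
  obtain ⟨ht, y, hy, hyt⟩ := h2
  exact ⟨fun z hz => ht z (hs z hz), y, hy, fun hys => hyt (hs y hys)⟩

lemma plt_length_lt {s t : List Int} (hs : s.Nodup) (ht : t.Nodup) (h : PLt s t) :
    s.length < t.length := by
  obtain ⟨hsub, x, hx, hxs⟩ := h
  have hss : s.toFinset ⊂ t.toFinset := by
    constructor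
    · intro z hz
      simp only [List.mem_toFinset] at *
      exact hsub z hz
    · intro hcon
      exact hxs (by simpa using hcon (by simpa using hx))
  calc s.length = s.toFinset.card := (List.toFinset_card_of_nodup hs).symm
    _ < t.toFinset.card := Finset.card_lt_card hss
    _ = t.length := List.toFinset_card_of_nodup ht

-- a properly-contained set is properly contained in a maximal (length-wise) element,
-- which itself is not properly contained in anything
lemma exists_maximal_sup (splits : List (List Int)) (hn : Pre_filter_minimal_splits splits)
    {s : List Int} (h : domP splits s) :
    ∃ t ∈ splits, PLt s t ∧ ¬ domP splits t := by
  classical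
  set S := splits.filter (fun t => decide (PLt s t)) with hS
  have hSne : S ≠ [] := by
    obtain ⟨t, ht, hpt⟩ := h
    intro hnil
    have : t ∈ S := by simp [hS, List.mem_filter, ht, hpt]
    simp [hnil] at this
  obtain ⟨a, haS, hmax⟩ := exists_len_max S hSne
  have haSp : a ∈ splits ∧ PLt s a := by
    have := haS; simp [hS, List.mem_filter] at this; exact this
  refine ⟨a, haSp.1, haSp.2, ?_⟩
  rintro ⟨u, hu, hau⟩
  have hsu : PLt s u := plt_trans haSp.2 hau
  have huS : u ∈ S := by simp [hS, List.mem_filter, hu, hsu]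
  have := hmax u huS
  have hlt := plt_length_lt (hn a haSp.1) (hn u hu) hau
  omega

-- the boolean A branches on, on an index
def keepB (splits : List (List Int)) (j : Nat) : Bool :=
  !(splits.any (fun t => pvProperSub (splits.getD j []) t))

lemma keepB_iff (splits : List (List Int)) (j : Nat) :
    keepB splits j = true ↔ ¬ domP splits (splits.getD j []) := by
  simp [keepB, domP, pvProperSub_iff]

-- core invariant of B's accumulator pass
lemma fold_invariant (splits : List (List Int)) (hn : Pre_filter_minimal_splits splits) :
    ∀ (ord processed : List Nat),
      (∀ j ∈ processed, j < splits.length) →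
      (∀ j ∈ ord, j < splits.length) →
      (∀ k, k < splits.length → k ∈ processed ∨ k ∈ ord) →
      ord.Pairwise (fun a b => (splits.getD b []).length ≤ (splits.getD a []).length) →
      ord.foldl (fun (st : List Nat × List (List Int)) i =>
          let s := splits.getD i []
          if st.2.any (fun t => pvProperSub s t) then st
          else (st.1 ++ [i], st.2 ++ [s]))
        (processed.filter (keepB splits),
         (processed.filter (keepB splits)).map (fun j => splits.getD j []))
        = ((processed ++ ord).filter (keepB splits),
           ((processed ++ ord).filter (keepB splits)).map (fun j => splits.getD j [])) := by
  intro ord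
  induction ord with
  | nil => intro processed _ _ _ _; simp
  | cons i rest ih =>
    intro processed hproc hord hcover hpw
    have hi : i < splits.length := hord i (List.mem_cons_self ..)
    have hmem_i : splits.getD i [] ∈ splits := by
      rw [List.getD_eq_getElem _ _ hi]; exact List.getElem_mem _
    -- B's accumulator test agrees with A's whole-list test at index i
    have hcond : ((processed.filter (keepB splits)).map (fun j => splits.getD j [])).any
        (fun t => pvProperSub (splits.getD i []) t) = !(keepB splits i) := by
      rcases hkb : keepB splits i with _ | _
      · -- keepB false: get i is properly contained in some split; a maximal one is kept
        have hdp : domP splits (splits.getD i []) := by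
          by_contra h
          exact absurd ((keepB_iff splits i).mpr h) (by simp [hkb])
        obtain ⟨t, ht, hst, hnt⟩ := exists_maximal_sup splits hn hdp
        obtain ⟨j, hj, hjt⟩ := List.mem_iff_getElem.mp ht
        have hgetj : splits.getD j [] = t := by rw [List.getD_eq_getElem _ _ hj]; exact hjt
        have hlen : (splits.getD i []).length < t.length :=
          plt_length_lt (hn _ hmem_i) (hn t ht) hst
        have hjp : j ∈ processed := by
          rcases hcover j hj with h | h
          · exact h
          · rcases List.mem_cons.mp h with rfl | hjr
            · rw [hgetj] at hlen; omega
            · have hle := (List.pairwise_cons.mp hpw).1 j hjr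
              rw [hgetj] at hle; omega
        have hkbj : keepB splits j = true := (keepB_iff splits j).mpr (by rw [hgetj]; exact hnt)
        rw [Bool.not_false, List.any_eq_true]
        exact ⟨t, List.mem_map.mpr ⟨j, List.mem_filter.mpr ⟨hjp, hkbj⟩, hgetj⟩,
          (pvProperSub_iff _ _).mpr hst⟩
      · -- keepB true: nothing kept properly contains get i
        rw [Bool.not_true, List.any_eq_false]
        intro t htB
        obtain ⟨j, hjf, rfl⟩ := List.mem_map.mp htB
        obtain ⟨hjp, _⟩ := List.mem_filter.mp hjf
        have hjn : j < splits.length := hproc j hjp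
        by_contra hcon
        have hPlt : PLt (splits.getD i []) (splits.getD j []) :=
          (pvProperSub_iff _ _).mp (by simpa using hcon)
        have hmem_j : splits.getD j [] ∈ splits := by
          rw [List.getD_eq_getElem _ _ hjn]; exact List.getElem_mem _
        exact absurd ⟨splits.getD j [], hmem_j, hPlt⟩ ((keepB_iff splits i).mp hkb)
    have hrec := ih (processed ++ [i])
      (by intro j hj
          rcases List.mem_append.mp hj with h | h
          · exact hproc j h
          · simp at h; omega)
      (fun j hj => hord j (List.mem_cons_of_mem _ hj))
      (by intro k hk
          rcases hcover k hk with h | h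
          · exact Or.inl (List.mem_append.mpr (Or.inl h))
          · rcases List.mem_cons.mp h with rfl | hr
            · exact Or.inl (by simp)
            · exact Or.inr hr)
      ((List.pairwise_cons.mp hpw).2)
    rcases hkb : keepB splits i with _ | _
    · -- the head split is dropped: a kept superset is already in the accumulator
      rw [hkb, Bool.not_false] at hcond
      have hfa : (processed ++ [i]).filter (keepB splits) = processed.filter (keepB splits) := by
        simp [List.filter_append, hkb]
      rw [hfa] at hrec
      rw [List.foldl_cons]
      dsimp only
      split
      · simpa using hrec
      · next h => exact absurd hcond h
    · -- the head split is kept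
      rw [hkb, Bool.not_true] at hcond
      have hfa : (processed ++ [i]).filter (keepB splits)
          = processed.filter (keepB splits) ++ [i] := by
        simp [List.filter_append, hkb]
      rw [hfa] at hrec
      rw [List.foldl_cons]
      dsimp only
      split
      · next h => rw [hcond] at h; exact absurd h (by simp)
      · simpa using hrec

-- the indexed filter-and-read-back equals a direct filter
lemma filter_range_map (l : List (List Int)) (q : List Int → Bool) :
    ((List.range l.length).filter (fun i => q (l.getD i []))).map (fun i => l.getD i [])
      = l.filter q := by
  induction l with
  | nil => simp
  | cons x xs ih =>
    rw [List.length_cons, List.range_succ_eq_map]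
    simp only [List.filter_cons, List.getD_cons_zero, List.getD_cons_succ, List.filter_map,
      Function.comp_def]
    have ih' := ih
    simp only [List.getD_eq_getElem?_getD] at ih' ⊢
    rcases hq : q x with _ | _ <;>
      simp [List.getElem?_cons_succ, Function.comp_def, ih']

-- A's foldl is a filter by the whole-list test
lemma portA_eq_filter (splits : List (List Int)) :
    filter_minimal_splits splits
      = splits.filter (fun s => !(splits.any (fun t => pvProperSub s t))) := by
  unfold filter_minimal_splits
  rw [PySem.List.foldl_append_if]
  simp [predA_eq]

theorem filter_minimal_splits_spec : Claim_equal_filter_minimal_splits := by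
  intro splits _ hpre
  unfold Spec_filter_minimal_splits
  rw [portA_eq_filter]
  unfold filter_minimal_splits_alt
  dsimp only
  have hinv := fold_invariant splits hpre
    (PySem.List.sorted (List.range splits.length)
      (fun i => -((splits.getD i []).length : Int)) false) []
    (by simp)
    (by intro j hj
        have := (PySem.List.mem_sorted _ _ _ j).mp hj
        simpa using this)
    (by intro k hk
        exact Or.inr ((PySem.List.mem_sorted _ _ _ k).mpr (List.mem_range.mpr hk)))
    (by
      have hp := PySem.List.sorted_pairwise (List.range splits.length)
        (fun i => -((splits.getD i []).length : Int))
      refine hp.imp ?_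
      intro a b h
      have : ((splits.getD b []).length : Int) ≤ ((splits.getD a []).length : Int) := by
        omega
      exact_mod_cast this)
  simp only [List.filter_nil, List.map_nil, List.nil_append] at hinv
  rw [hinv]
  rw [PySem.List.foldl_append_if]
  have hfc : ∀ i ∈ List.range splits.length,
      ((PySem.List.sorted (List.range splits.length)
          (fun i => -((splits.getD i []).length : Int)) false).filter (keepB splits)).contains i
        = keepB splits i := by
    intro i hi
    have hio : i ∈ PySem.List.sorted (List.range splits.length)
        (fun i => -((splits.getD i []).length : Int)) false :=
      (PySem.List.mem_sorted _ _ _ i).mpr hi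
    rcases h : keepB splits i with _ | _ <;>
      simp [List.mem_filter, h, List.mem_range.mp hi]
  rw [List.filter_congr hfc]
  have := filter_range_map splits (fun s => !(splits.any (fun t => pvProperSub s t)))
  simpa [keepB] using this.symm
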